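-- pv_equiv track=rewrite | github.com/markcosker2-dev/orova-backend | templates.py | generate_targeting_v3
-- ===== SOURCE A (Python) =====
-- def generate_targeting_v3(product, audience):
--     """Strategic targeting based on product category and audience"""
--
--     # Industry-specific interest mapping
--     targeting_map = {
--         'gym': {
--             'interests': ['Physical fitness', 'Bodybuilding', 'CrossFit', 'Gym', 'Health club'],
--             'behaviors': ['Fitness enthusiasts', 'Health and wellness'],
--             'category': 'Fitness'
--         },
--         'restaurant': {
--             'interests': ['Foodie', 'Restaurants', 'Food delivery', 'Fine dining', 'Cooking'],
--             'behaviors': ['Frequent diners', 'Food and dining'],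
--             'category': 'Food & Beverage'
--         },
--         'saas': {
--             'interests': ['Software', 'SaaS', 'Cloud computing', 'Business software', 'Productivity tools'],
--             'behaviors': ['Small business owners', 'Technology early adopters'],
--             'category': 'Technology'
--         },
--         'ecommerce': {
--             'interests': ['Online shopping', 'E-commerce', 'Shopping and fashion', 'Retail'],
--             'behaviors': ['Engaged shoppers', 'Online purchasers'],
--             'category': 'E-commerce'
--         },
--         'real_estate': {
--             'interests': ['Real estate', 'Property', 'Home buying', 'Residential real estate'],
--             'behaviors': ['Likely to move', 'New homeowners'],
--             'category': 'Real Estate'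
--         },
--         'automotive': {
--             'interests': ['Cars', 'Automobiles', 'Car buying', 'Auto shows'],
--             'behaviors': ['Car buyers', 'Auto enthusiasts'],
--             'category': 'Automotive'
--         },
--         'healthcare': {
--             'interests': ['Health care', 'Medical services', 'Wellness', 'Dentistry'],
--             'behaviors': ['Health-conscious consumers'],
--             'category': 'Healthcare'
--         }
--     }
--
--     # Detect category from product name and audience
--     product_lower = product.lower()
--     audience_lower = audience.lower()
--     category = 'saas'  # Default
--
--     if any(word in product_lower or word in audience_lower for word in ['gym', 'fitness', 'training', 'workout']):
--         category = 'gym'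
--     elif any(word in product_lower or word in audience_lower for word in ['restaurant', 'food', 'cafe', 'dining']):
--         category = 'restaurant'
--     elif any(word in product_lower or word in audience_lower for word in ['shop', 'store', 'clothing', 'fashion', 'ecommerce', 'e-commerce']):
--         category = 'ecommerce'
--     elif any(word in product_lower or word in audience_lower for word in ['property', 'real estate', 'realtor', 'home']):
--         category = 'real_estate'
--     elif any(word in product_lower or word in audience_lower for word in ['car', 'auto', 'vehicle', 'dealership']):
--         category = 'automotive'
--     elif any(word in product_lower or word in audience_lower for word in ['health', 'medical', 'clinic', 'doctor', 'dental']):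
--         category = 'healthcare'
--
--     target = targeting_map.get(category, targeting_map['saas'])
--
--     return {
--         "interests": ", ".join(target['interests'][:4]),  # Top 4 interests
--         "behaviors": ", ".join(target['behaviors']),
--         "demographics": "Ages 24-55 (Exclude bottom 50% income)",
--         "category": target['category']  # Return detected category
--     }
-- ===== SOURCE B (Python) =====
-- # Priority-minimisation rewrite: instead of a first-match if/elif chain over
-- # keyword groups, scan a FLAT keyword->priority map once, take the minimum
-- # priority among all matched keywords (order-independent), and index a
-- # category array with it; results are fully precomputed per category.
--
-- _WORD_PRI = {
--     'gym': 0, 'fitness': 0, 'training': 0, 'workout': 0,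
--     'restaurant': 1, 'food': 1, 'cafe': 1, 'dining': 1,
--     'shop': 2, 'store': 2, 'clothing': 2, 'fashion': 2, 'ecommerce': 2, 'e-commerce': 2,
--     'property': 3, 'real estate': 3, 'realtor': 3, 'home': 3,
--     'car': 4, 'auto': 4, 'vehicle': 4, 'dealership': 4,
--     'health': 5, 'medical': 5, 'clinic': 5, 'doctor': 5, 'dental': 5,
-- }
--
-- _CATS = ['gym', 'restaurant', 'ecommerce', 'real_estate', 'automotive',
--          'healthcare', 'saas']
--
-- _RESULTS = {
--     'gym': {
--         "interests": "Physical fitness, Bodybuilding, CrossFit, Gym",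
--         "behaviors": "Fitness enthusiasts, Health and wellness",
--         "demographics": "Ages 24-55 (Exclude bottom 50% income)",
--         "category": "Fitness",
--     },
--     'restaurant': {
--         "interests": "Foodie, Restaurants, Food delivery, Fine dining",
--         "behaviors": "Frequent diners, Food and dining",
--         "demographics": "Ages 24-55 (Exclude bottom 50% income)",
--         "category": "Food & Beverage",
--     },
--     'saas': {
--         "interests": "Software, SaaS, Cloud computing, Business software",
--         "behaviors": "Small business owners, Technology early adopters",
--         "demographics": "Ages 24-55 (Exclude bottom 50% income)",
--         "category": "Technology",
--     },
--     'ecommerce': {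
--         "interests": "Online shopping, E-commerce, Shopping and fashion, Retail",
--         "behaviors": "Engaged shoppers, Online purchasers",
--         "demographics": "Ages 24-55 (Exclude bottom 50% income)",
--         "category": "E-commerce",
--     },
--     'real_estate': {
--         "interests": "Real estate, Property, Home buying, Residential real estate",
--         "behaviors": "Likely to move, New homeowners",
--         "demographics": "Ages 24-55 (Exclude bottom 50% income)",
--         "category": "Real Estate",
--     },
--     'automotive': {
--         "interests": "Cars, Automobiles, Car buying, Auto shows",
--         "behaviors": "Car buyers, Auto enthusiasts",
--         "demographics": "Ages 24-55 (Exclude bottom 50% income)",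
--         "category": "Automotive",
--     },
--     'healthcare': {
--         "interests": "Health care, Medical services, Wellness, Dentistry",
--         "behaviors": "Health-conscious consumers",
--         "demographics": "Ages 24-55 (Exclude bottom 50% income)",
--         "category": "Healthcare",
--     },
-- }
--
--
-- def generate_targeting_v3(product, audience):
--     """Strategic targeting based on product category and audience"""
--     tp = product.lower()
--     ta = audience.lower()
--     best = 6  # priority of the default category 'saas'
--     for word, pri in _WORD_PRI.items():
--         if word in tp or word in ta:
--             best = min(best, pri)
--     return dict(_RESULTS[_CATS[best]])
-- ===== Notes on version B (the rewrite author's own statement) =====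
-- stated objective: alternative
-- what changed: Replaced the six-branch short-circuiting if/elif keyword chain by an order-independent minimisation: one pass over a flat keyword-to-priority map takes the minimum priority among all matched keywords, which indexes a category array whose precomputed result row is returned.
import Mathlib
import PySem

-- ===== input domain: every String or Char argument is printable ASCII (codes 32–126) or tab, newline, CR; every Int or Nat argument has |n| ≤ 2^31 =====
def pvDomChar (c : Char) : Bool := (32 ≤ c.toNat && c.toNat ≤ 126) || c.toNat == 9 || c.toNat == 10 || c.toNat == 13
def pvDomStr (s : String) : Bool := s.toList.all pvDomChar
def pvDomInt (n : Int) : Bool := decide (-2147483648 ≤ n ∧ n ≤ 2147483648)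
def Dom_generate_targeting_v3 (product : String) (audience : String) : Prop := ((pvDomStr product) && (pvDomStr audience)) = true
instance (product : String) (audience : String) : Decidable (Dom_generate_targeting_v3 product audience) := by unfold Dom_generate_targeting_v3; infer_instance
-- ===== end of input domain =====

-- B replaces A's short-circuiting if/elif keyword chain by an order-independent
-- minimum over a flat keyword->priority map, indexing a precomputed result table
-- (objective: alternative, same cost).


-- ===== PORT A =====
-- `any(word in product_lower or word in audience_lower for word in ws)`
def pvAnyIn (ws : List String) (pl al : String) : Bool :=
  ws.any (fun w => PySem.Str.isIn w pl || PySem.Str.isIn w al)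

-- values of targeting_map: (interests, behaviors, category)
def pvTargetingMap : PySem.Dict String (List String × List String × String) :=
  PySem.Dict.ofList
    [ ("gym", (["Physical fitness", "Bodybuilding", "CrossFit", "Gym", "Health club"],
               ["Fitness enthusiasts", "Health and wellness"], "Fitness")),
      ("restaurant", (["Foodie", "Restaurants", "Food delivery", "Fine dining", "Cooking"],
               ["Frequent diners", "Food and dining"], "Food & Beverage")),
      ("saas", (["Software", "SaaS", "Cloud computing", "Business software", "Productivity tools"],
               ["Small business owners", "Technology early adopters"], "Technology")),
      ("ecommerce", (["Online shopping", "E-commerce", "Shopping and fashion", "Retail"],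
               ["Engaged shoppers", "Online purchasers"], "E-commerce")),
      ("real_estate", (["Real estate", "Property", "Home buying", "Residential real estate"],
               ["Likely to move", "New homeowners"], "Real Estate")),
      ("automotive", (["Cars", "Automobiles", "Car buying", "Auto shows"],
               ["Car buyers", "Auto enthusiasts"], "Automotive")),
      ("healthcare", (["Health care", "Medical services", "Wellness", "Dentistry"],
               ["Health-conscious consumers"], "Healthcare")) ]

def generate_targeting_v3 (product : String) (audience : String) : List (String × String) :=
  let product_lower := PySem.Str.lower product
  let audience_lower := PySem.Str.lower audience
  let category :=
    if pvAnyIn ["gym", "fitness", "training", "workout"] product_lower audience_lower then "gym"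
    else if pvAnyIn ["restaurant", "food", "cafe", "dining"] product_lower audience_lower then "restaurant"
    else if pvAnyIn ["shop", "store", "clothing", "fashion", "ecommerce", "e-commerce"] product_lower audience_lower then "ecommerce"
    else if pvAnyIn ["property", "real estate", "realtor", "home"] product_lower audience_lower then "real_estate"
    else if pvAnyIn ["car", "auto", "vehicle", "dealership"] product_lower audience_lower then "automotive"
    else if pvAnyIn ["health", "medical", "clinic", "doctor", "dental"] product_lower audience_lower then "healthcare"
    else "saas"
  -- targeting_map.get(category, targeting_map['saas']); 'saas' is a key, so the inner
  -- default ([], [], "") of the KeyError-free lookup is unreachable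
  let target := (PySem.Dict.get? pvTargetingMap category).getD
                  ((PySem.Dict.get? pvTargetingMap "saas").getD ([], [], ""))
  [ ("interests", PySem.Str.join ", " (PySem.List.slice target.1 none (some 4))),
    ("behaviors", PySem.Str.join ", " target.2.1),
    ("demographics", "Ages 24-55 (Exclude bottom 50% income)"),
    ("category", target.2.2) ]

-- ===== PORT B =====
-- flat keyword -> priority map, in dict insertion order
def pvWordPri : List (String × Nat) :=
  [ ("gym", 0), ("fitness", 0), ("training", 0), ("workout", 0),
    ("restaurant", 1), ("food", 1), ("cafe", 1), ("dining", 1),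
    ("shop", 2), ("store", 2), ("clothing", 2), ("fashion", 2), ("ecommerce", 2), ("e-commerce", 2),
    ("property", 3), ("real estate", 3), ("realtor", 3), ("home", 3),
    ("car", 4), ("auto", 4), ("vehicle", 4), ("dealership", 4),
    ("health", 5), ("medical", 5), ("clinic", 5), ("doctor", 5), ("dental", 5) ]

def pvCats : List String :=
  ["gym", "restaurant", "ecommerce", "real_estate", "automotive", "healthcare", "saas"]

def pvResults : PySem.Dict String (List (String × String)) :=
  PySem.Dict.ofList
    [ ("gym", [("interests", "Physical fitness, Bodybuilding, CrossFit, Gym"),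
               ("behaviors", "Fitness enthusiasts, Health and wellness"),
               ("demographics", "Ages 24-55 (Exclude bottom 50% income)"),
               ("category", "Fitness")]),
      ("restaurant", [("interests", "Foodie, Restaurants, Food delivery, Fine dining"),
               ("behaviors", "Frequent diners, Food and dining"),
               ("demographics", "Ages 24-55 (Exclude bottom 50% income)"),
               ("category", "Food & Beverage")]),
      ("saas", [("interests", "Software, SaaS, Cloud computing, Business software"),
               ("behaviors", "Small business owners, Technology early adopters"),
               ("demographics", "Ages 24-55 (Exclude bottom 50% income)"),
               ("category", "Technology")]),
      ("ecommerce", [("interests", "Online shopping, E-commerce, Shopping and fashion, Retail"),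
               ("behaviors", "Engaged shoppers, Online purchasers"),
               ("demographics", "Ages 24-55 (Exclude bottom 50% income)"),
               ("category", "E-commerce")]),
      ("real_estate", [("interests", "Real estate, Property, Home buying, Residential real estate"),
               ("behaviors", "Likely to move, New homeowners"),
               ("demographics", "Ages 24-55 (Exclude bottom 50% income)"),
               ("category", "Real Estate")]),
      ("automotive", [("interests", "Cars, Automobiles, Car buying, Auto shows"),
               ("behaviors", "Car buyers, Auto enthusiasts"),
               ("demographics", "Ages 24-55 (Exclude bottom 50% income)"),
               ("category", "Automotive")]),
      ("healthcare", [("interests", "Health care, Medical services, Wellness, Dentistry"),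
               ("behaviors", "Health-conscious consumers"),
               ("demographics", "Ages 24-55 (Exclude bottom 50% income)"),
               ("category", "Healthcare")]) ]

-- loop body: `if word in tp or word in ta: best = min(best, pri)`
def pvStep (tp ta : String) (best : Nat) (wp : String × Nat) : Nat :=
  if PySem.Str.isIn wp.1 tp || PySem.Str.isIn wp.1 ta then min best wp.2 else best

def generate_targeting_v3_alt (product : String) (audience : String) : List (String × String) :=
  let tp := PySem.Str.lower product
  let ta := PySem.Str.lower audience
  let best := pvWordPri.foldl (pvStep tp ta) 6
  -- _CATS[best]; best is always in 0..6, so the IndexError default "saas" is unreachable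
  let category := (PySem.List.pyGet? pvCats (Int.ofNat best)).getD "saas"
  -- _RESULTS[category]; category is always a key, so the KeyError default [] is unreachable
  (PySem.Dict.get? pvResults category).getD []

-- ===== PRECONDITION & SPEC =====
def Spec_generate_targeting_v3 (product : String) (audience : String) (out : List (String × String)) : Prop := out = generate_targeting_v3_alt product audience
instance (product : String) (audience : String) (out : List (String × String)) : Decidable (Spec_generate_targeting_v3 product audience out) := by unfold Spec_generate_targeting_v3; infer_instance

-- ===== CLAIM =====
def Claim_equal_generate_targeting_v3 : Prop := ∀ (product : String) (audience : String), Dom_generate_targeting_v3 product audience → Spec_generate_targeting_v3 product audience (generate_targeting_v3 product audience)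

-- ===== LEMMAS AND PROOFS =====
-- folding the loop body over one keyword group with a common priority p
theorem pv_group_fold (tp ta : String) (p : Nat) : ∀ (ws : List String) (a : Nat),
    List.foldl (pvStep tp ta) a (ws.map (fun w => (w, p)))
      = if pvAnyIn ws tp ta then min a p else a := by
  intro ws
  induction ws with
  | nil => intro a; simp [pvAnyIn]
  | cons w ws ih =>
    intro a
    simp only [List.map, List.foldl, ih, pvStep]
    by_cases ht : (PySem.Str.isIn w tp || PySem.Str.isIn w ta) = true <;>
      by_cases ha : pvAnyIn ws tp ta = true <;>
        simp_all [pvAnyIn, List.any_cons]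

-- the flat map is the concatenation of the six keyword groups
theorem pvWordPri_split : pvWordPri =
    (["gym", "fitness", "training", "workout"].map (fun w => (w, 0)))
    ++ (["restaurant", "food", "cafe", "dining"].map (fun w => (w, 1)))
    ++ (["shop", "store", "clothing", "fashion", "ecommerce", "e-commerce"].map (fun w => (w, 2)))
    ++ (["property", "real estate", "realtor", "home"].map (fun w => (w, 3)))
    ++ (["car", "auto", "vehicle", "dealership"].map (fun w => (w, 4)))
    ++ (["health", "medical", "clinic", "doctor", "dental"].map (fun w => (w, 5))) := by
  decide

-- with the six group tests abstracted to Booleans, the two result computations agree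
theorem pv_core_eq (b1 b2 b3 b4 b5 b6 : Bool) :
    (let category :=
      if b1 = true then "gym"
      else if b2 = true then "restaurant"
      else if b3 = true then "ecommerce"
      else if b4 = true then "real_estate"
      else if b5 = true then "automotive"
      else if b6 = true then "healthcare"
      else "saas"
     let target := (PySem.Dict.get? pvTargetingMap category).getD
                     ((PySem.Dict.get? pvTargetingMap "saas").getD ([], [], ""))
     [ (("interests" : String), PySem.Str.join ", " (PySem.List.slice target.1 none (some 4))),
       ("behaviors", PySem.Str.join ", " target.2.1),
       ("demographics", "Ages 24-55 (Exclude bottom 50% income)"),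
       ("category", target.2.2) ])
    = (let best :=
         if b6 = true then
           min (if b5 = true then
                  min (if b4 = true then
                         min (if b3 = true then
                                min (if b2 = true then
                                       min (if b1 = true then min 6 0 else 6) 1
                                     else if b1 = true then min 6 0 else 6) 2
                              else if b2 = true then min (if b1 = true then min 6 0 else 6) 1
                                   else if b1 = true then min 6 0 else 6) 3
                       else if b3 = true then
                              min (if b2 = true then min (if b1 = true then min 6 0 else 6) 1
                                   else if b1 = true then min 6 0 else 6) 2
                            else if b2 = true then min (if b1 = true then min 6 0 else 6) 1
                                 else if b1 = true then min 6 0 else 6) 4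
                else if b4 = true then
                       min (if b3 = true then
                              min (if b2 = true then min (if b1 = true then min 6 0 else 6) 1
                                   else if b1 = true then min 6 0 else 6) 2
                            else if b2 = true then min (if b1 = true then min 6 0 else 6) 1
                                 else if b1 = true then min 6 0 else 6) 3
                     else if b3 = true then
                            min (if b2 = true then min (if b1 = true then min 6 0 else 6) 1
                                 else if b1 = true then min 6 0 else 6) 2
                          else if b2 = true then min (if b1 = true then min 6 0 else 6) 1
                               else if b1 = true then min 6 0 else 6) 5
         else if b5 = true then
                min (if b4 = true then
                       min (if b3 = true then
                              min (if b2 = true then min (if b1 = true then min 6 0 else 6) 1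
                                   else if b1 = true then min 6 0 else 6) 2
                            else if b2 = true then min (if b1 = true then min 6 0 else 6) 1
                                 else if b1 = true then min 6 0 else 6) 3
                     else if b3 = true then
                            min (if b2 = true then min (if b1 = true then min 6 0 else 6) 1
                                 else if b1 = true then min 6 0 else 6) 2
                          else if b2 = true then min (if b1 = true then min 6 0 else 6) 1
                               else if b1 = true then min 6 0 else 6) 4
              else if b4 = true then
                     min (if b3 = true then
                            min (if b2 = true then min (if b1 = true then min 6 0 else 6) 1
                                 else if b1 = true then min 6 0 else 6) 2
                          else if b2 = true then min (if b1 = true then min 6 0 else 6) 1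
                               else if b1 = true then min 6 0 else 6) 3
                   else if b3 = true then
                          min (if b2 = true then min (if b1 = true then min 6 0 else 6) 1
                               else if b1 = true then min 6 0 else 6) 2
                        else if b2 = true then min (if b1 = true then min 6 0 else 6) 1
                             else if b1 = true then min 6 0 else 6
       (PySem.Dict.get? pvResults
          ((PySem.List.pyGet? pvCats (Int.ofNat best)).getD "saas")).getD []) := by
  cases b1 <;> cases b2 <;> cases b3 <;> cases b4 <;> cases b5 <;> cases b6 <;> decide

-- ===== VERDICT =====
theorem generate_targeting_v3_spec : Claim_equal_generate_targeting_v3 := by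
  intro product audience _
  show generate_targeting_v3 product audience = generate_targeting_v3_alt product audience
  simp only [generate_targeting_v3, generate_targeting_v3_alt,
             pvWordPri_split, List.foldl_append, pv_group_fold]
  exact pv_core_eq _ _ _ _ _ _
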